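-- pv_equiv track=rewrite | github.com/blackjackbanks/cursor-vexcel-muq8ie | src/backend/services/ai/src/utils/validation.py | _parse_function_arguments
-- ===== SOURCE A (Python) =====
-- from typing import Dict, Any, Set, Pattern, List, Tuple
--
-- def _parse_function_arguments(args_str: str) -> List[str]:
--     """Parses function arguments handling nested functions."""
--     args = []
--     current_arg = []
--     paren_count = 0
--     in_quotes = False
--
--     for char in args_str:
--         if char == '"':
--             in_quotes = not in_quotes
--         elif not in_quotes:
--             if char == '(':
--                 paren_count += 1
--             elif char == ')':
--                 paren_count -= 1
--             elif char == ',' and paren_count == 0: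
--                 args.append(''.join(current_arg).strip())
--                 current_arg = []
--                 continue
--         current_arg.append(char)
--
--     if current_arg:
--         args.append(''.join(current_arg).strip())
--
--     return args
-- ===== SOURCE B (Python) =====
-- def _parse_function_arguments(args_str: str):
--     # Pass 1: record positions of top-level commas (depth 0, outside quotes).
--     comma_positions = []
--     depth = 0
--     in_quotes = False
--     for i, ch in enumerate(args_str):
--         if ch == '"':
--             in_quotes = not in_quotes
--         elif not in_quotes:
--             if ch == '(':
--                 depth += 1
--             elif ch == ')':
--                 depth -= 1
--             elif ch == ',' and depth == 0:
--                 comma_positions.append(i)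
--     # Pass 2: slice the string between successive boundaries and strip.
--     args = []
--     start = 0
--     for pos in comma_positions:
--         args.append(args_str[start:pos].strip())
--         start = pos + 1
--     if start < len(args_str):
--         args.append(args_str[start:].strip())
--     return args
-- ===== Notes on version B (the rewrite author's own statement) =====
-- stated objective: alternative
-- what changed: B replaces A's per-char buffer building (append every kept char, join+strip at each cut) by two passes: one scan that only records the indices of top-level commas, then a slicing pass that strips each substring between successive boundaries.
import Mathlib
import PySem

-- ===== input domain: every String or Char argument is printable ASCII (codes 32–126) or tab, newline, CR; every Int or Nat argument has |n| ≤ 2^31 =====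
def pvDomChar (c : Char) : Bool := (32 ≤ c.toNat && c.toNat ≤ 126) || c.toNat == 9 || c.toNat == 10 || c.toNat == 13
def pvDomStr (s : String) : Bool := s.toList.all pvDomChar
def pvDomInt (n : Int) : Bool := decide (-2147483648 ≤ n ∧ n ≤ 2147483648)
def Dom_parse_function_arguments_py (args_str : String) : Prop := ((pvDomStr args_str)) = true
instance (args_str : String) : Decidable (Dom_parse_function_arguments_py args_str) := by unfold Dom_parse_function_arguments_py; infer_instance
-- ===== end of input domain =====

-- B records top-level comma indices in one scan, then slices and strips between them
-- (alternative decomposition, same O(n) cost); return values proved equal on the whole domain.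

-- ===== PORT A =====
-- one loop iteration of A: state = (args, current_arg, paren_count, in_quotes)
def pvAStep : (List String × List Char × Int × Bool) → Char → (List String × List Char × Int × Bool)
  | (args, cur, p, q), c =>
    if c = '"' then (args, cur ++ [c], p, !q)
    else if q = false then
      if c = '(' then (args, cur ++ [c], p + 1, q)
      else if c = ')' then (args, cur ++ [c], p - 1, q)
      else if c = ',' ∧ p = 0 then (args ++ [String.ofList (PySem.Chars.strip cur)], [], p, q)
      else (args, cur ++ [c], p, q)
    else (args, cur ++ [c], p, q)

def parse_function_arguments_py (args_str : String) : List String :=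
  let st := args_str.toList.foldl pvAStep ([], [], 0, false)
  if st.2.1 ≠ [] then st.1 ++ [String.ofList (PySem.Chars.strip st.2.1)] else st.1

-- ===== PORT B =====
-- pass 1 iteration: state = (comma_positions, depth, in_quotes); input = (index, char) from enumerate
def pvBCutStep : (List Int × Int × Bool) → (Int × Char) → (List Int × Int × Bool)
  | (cuts, d, q), (i, c) =>
    if c = '"' then (cuts, d, !q)
    else if q = false then
      if c = '(' then (cuts, d + 1, q)
      else if c = ')' then (cuts, d - 1, q)
      else if c = ',' ∧ d = 0 then (cuts ++ [i], d, q)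
      else (cuts, d, q)
    else (cuts, d, q)

-- pass 2 iteration over the comma positions: state = (args, start)
def pvBSliceStep (s : List Char) : (List String × Int) → Int → (List String × Int)
  | (args, start), pos =>
    (args ++ [String.ofList (PySem.Chars.strip (PySem.List.slice s (some start) (some pos)))], pos + 1)

def parse_function_arguments_py_alt (args_str : String) : List String :=
  let s := args_str.toList
  let cuts := ((PySem.List.enumerate s 0).foldl pvBCutStep ([], 0, false)).1
  let fin := cuts.foldl (pvBSliceStep s) ([], 0)
  if fin.2 < (s.length : Int) then
    fin.1 ++ [String.ofList (PySem.Chars.strip (PySem.List.slice s (some fin.2) none))]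
  else fin.1

-- ===== PRECONDITION & SPEC =====
def Spec_parse_function_arguments_py (args_str : String) (out : List String) : Prop := out = parse_function_arguments_py_alt args_str
instance (args_str : String) (out : List String) : Decidable (Spec_parse_function_arguments_py args_str out) := by unfold Spec_parse_function_arguments_py; infer_instance

-- ===== CLAIM (what is proved, stated in full; the proofs are below) =====
def Claim_equal_parse_function_arguments_py : Prop := ∀ (args_str : String), Dom_parse_function_arguments_py args_str → Spec_parse_function_arguments_py args_str (parse_function_arguments_py args_str)

-- ===== LEMMAS AND PROOFS =====

-- A's final step (trailing append) as a function of the loop's end state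
def pvAFin (st : List String × List Char × Int × Bool) : List String :=
  if st.2.1 ≠ [] then st.1 ++ [String.ofList (PySem.Chars.strip st.2.1)] else st.1

-- B's pass 2 (+ trailing slice) as a function of the comma positions
def pvBFin (s : List Char) (args : List String) (start : Int) (cuts : List Int) : List String :=
  let fin := cuts.foldl (pvBSliceStep s) (args, start)
  if fin.2 < (s.length : Int) then
    fin.1 ++ [String.ofList (PySem.Chars.strip (PySem.List.slice s (some fin.2) none))]
  else fin.1

-- pass 1's comma-position accumulator only grows at the front
lemma pvBCut_acc (l : List (Int × Char)) : ∀ (cuts : List Int) (d : Int) (q : Bool),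
    l.foldl pvBCutStep (cuts, d, q)
      = (cuts ++ (l.foldl pvBCutStep ([], d, q)).1, (l.foldl pvBCutStep ([], d, q)).2) := by
  induction l with
  | nil => intro cuts d q; simp [List.foldl]
  | cons ic l ih =>
    intro cuts d q
    obtain ⟨i, c⟩ := ic
    simp only [List.foldl, pvBCutStep]
    split_ifs
    · exact ih cuts d (!q)
    · exact ih cuts (d + 1) q
    · exact ih cuts (d - 1) q
    · simp only [List.nil_append]
      rw [ih (cuts ++ [i]) d q, ih [i] d q]
      simp
    · exact ih cuts d q
    · exact ih cuts d q

lemma pvBFin_cons (s : List Char) (args : List String) (start pos : Int) (cuts : List Int) :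
    pvBFin s args start (pos :: cuts)
      = pvBFin s (args ++ [String.ofList (PySem.Chars.strip (PySem.List.slice s (some start) (some pos)))])
          (pos + 1) cuts := rfl

-- main invariant: A's loop from state (args, pre.drop start, p, q) over rest equals
-- B's slicing of (pre ++ rest) at the comma positions pass 1 finds in rest
lemma pvMain (rest : List Char) : ∀ (pre : List Char) (start : Nat) (p : Int) (q : Bool)
    (args : List String), start ≤ pre.length →
    pvAFin (rest.foldl pvAStep (args, pre.drop start, p, q))
      = pvBFin (pre ++ rest) args (start : Int)
          ((PySem.List.enumerate rest (pre.length : Int)).foldl pvBCutStep ([], p, q)).1 := by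
  induction rest with
  | nil =>
    intro pre start p q args hle
    simp only [PySem.List.enumerate, List.foldl, pvAFin, pvBFin, List.append_nil]
    rw [PySem.List.slice_from_natCast]
    have hlen : (start : Int) < (pre.length : Int) ↔ start < pre.length := by exact_mod_cast Iff.rfl
    by_cases h : start < pre.length
    · rw [if_pos (by simpa [List.drop_eq_nil_iff] using by omega), if_pos (hlen.mpr h)]
    · rw [if_neg (by simp [List.drop_eq_nil_iff]; omega), if_neg (by omega)]
  | cons c l ih =>
    intro pre start p q args hle
    rw [PySem.List.enumerate_cons]
    simp only [List.foldl, pvAStep, pvBCutStep]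
    have hdrop : ∀ ch : Char, pre.drop start ++ [ch] = (pre ++ [ch]).drop start :=
      fun ch => (List.drop_append_of_le_length hle).symm
    have hre : ∀ ch : Char, (pre ++ [ch]) ++ l = pre ++ ch :: l := by simp
    have hlen1 : ((pre ++ [c]).length : Int) = (pre.length : Int) + 1 := by simp
    split_ifs
    · rw [hdrop c, ih (pre ++ [c]) start p (!q) args (by simp; omega)]
      rw [hre c, hlen1]
    · rw [hdrop c, ih (pre ++ [c]) start (p + 1) q args (by simp; omega)]
      rw [hre c, hlen1]
    · rw [hdrop c, ih (pre ++ [c]) start (p - 1) q args (by simp; omega)]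
      rw [hre c, hlen1]
    · -- top-level comma
      rename_i hcond
      obtain ⟨hc, hp⟩ := hcond
      subst hc hp
      have hnil : ([] : List Char) = (pre ++ [',']).drop (pre.length + 1) := by simp
      rw [hnil, ih (pre ++ [',']) (pre.length + 1)
            0 q (args ++ [String.ofList (PySem.Chars.strip (pre.drop start))]) (by simp)]
      rw [hre ',', hlen1]
      simp only [List.nil_append]
      rw [pvBCut_acc _ [(pre.length : Int)]]
      simp only [List.singleton_append]
      rw [pvBFin_cons]
      have hslice : PySem.List.slice (pre ++ ',' :: l) (some (start : Int)) (some (pre.length : Int))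
          = pre.drop start := by
        rw [PySem.List.slice_natCast, List.drop_append_of_le_length hle,
          List.take_left' (by simp)]
      have hcast : ((pre.length + 1 : Nat) : Int) = (pre.length : Int) + 1 := by push_cast; ring
      rw [hslice, hcast]
    · rw [hdrop c, ih (pre ++ [c]) start p q args (by simp; omega)]
      rw [hre c, hlen1]
    · rw [hdrop c, ih (pre ++ [c]) start p q args (by simp; omega)]
      rw [hre c, hlen1]

-- ===== VERDICT (by name: the statement is the Claim_ definition above) =====
theorem parse_function_arguments_py_spec : Claim_equal_parse_function_arguments_py := by
  intro args_str _
  unfold Spec_parse_function_arguments_py parse_function_arguments_py parse_function_arguments_py_alt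
  have h := pvMain args_str.toList [] 0 0 false [] (by simp)
  simpa [pvAFin, pvBFin] using h
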